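-- pv_equiv track=rewrite | github.com/Semeriuss/A2SV-Labs | 43. balancedTeam.py | maxBalancedTeam
-- ===== SOURCE A (Python) =====
-- def maxBalancedTeam(skills):
--     maxTeamsList = []
--     for i in range(len(skills)-1):
--         maxTeam = 1
--         for j in range(i+1, len(skills)):
--             if abs(skills[i] - skills[j]) <= 5:
--                 maxTeam += 1
--         maxTeamsList.append(maxTeam)
--
--     return max(maxTeamsList)
-- ===== SOURCE B (Python) =====
-- def maxBalancedTeam(skills):
--     counts = {}
--     counts[skills[-1]] = 1
--     best = 0
--     for i in range(len(skills) - 2, -1, -1):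
--         v = skills[i]
--         close = 0
--         for d in range(-5, 6):
--             close += counts.get(v + d, 0)
--         if close + 1 > best:
--             best = close + 1
--         counts[v] = counts.get(v, 0) + 1
--     return best
-- ===== Notes on version B (the rewrite author's own statement) =====
-- stated objective: faster
-- what changed: A's O(n^2) nested scan (for each i, count all later elements within 5) is replaced by one right-to-left pass that maintains a counter dict of the suffix and sums the 11 value buckets v-5..v+5 per element.
-- outside the precondition, e.g. on maxBalancedTeam([7]): A raises ValueError, B returns 0; on maxBalancedTeam([]): A raises ValueError, B raises IndexError
import Mathlib
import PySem

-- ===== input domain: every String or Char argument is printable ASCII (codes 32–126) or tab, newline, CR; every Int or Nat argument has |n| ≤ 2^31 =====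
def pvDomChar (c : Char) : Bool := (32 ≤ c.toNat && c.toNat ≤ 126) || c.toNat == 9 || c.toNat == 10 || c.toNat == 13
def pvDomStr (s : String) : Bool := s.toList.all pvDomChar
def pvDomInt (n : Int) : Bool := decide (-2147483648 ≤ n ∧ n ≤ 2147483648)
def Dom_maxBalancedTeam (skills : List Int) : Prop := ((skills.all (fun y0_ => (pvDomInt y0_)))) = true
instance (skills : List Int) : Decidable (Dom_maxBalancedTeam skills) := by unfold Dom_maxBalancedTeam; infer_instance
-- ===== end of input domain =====

-- B replaces A's quadratic scan of all later elements by a single right-to-left pass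
-- keeping a counter dict and summing the 11 buckets v-5 … v+5 (equivalence of the
-- RETURN value; neither program mutates its argument).

-- ===== PORT A =====
def maxBalancedTeam (skills : List Int) : Int :=
  let maxTeamsList : List Int :=
    (PySem.List.pyRange 0 (PySem.List.len skills - 1) 1).foldl
      (fun acc i =>
        let maxTeam : Int :=
          (PySem.List.pyRange (i + 1) (PySem.List.len skills) 1).foldl
            (fun maxTeam j =>
              if (PySem.List.pyGetD skills i 0 - PySem.List.pyGetD skills j 0).natAbs ≤ 5 then
                maxTeam + 1
              else maxTeam) 1
        acc ++ [maxTeam]) []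
  (PySem.List.max? maxTeamsList (fun y => y)).getD 0

-- ===== PORT B =====
def maxBalancedTeam_alt (skills : List Int) : Int :=
  let counts0 : PySem.Dict Int Int :=
    PySem.Dict.insert PySem.Dict.empty (PySem.List.pyGetD skills (-1) 0) 1
  let res : Int × PySem.Dict Int Int :=
    (PySem.List.pyRange (PySem.List.len skills - 2) (-1) (-1)).foldl
      (fun st i =>
        let v := PySem.List.pyGetD skills i 0
        let close : Int :=
          (PySem.List.pyRange (-5) 6 1).foldl (fun c d => c + st.2.getD (v + d) 0) 0
        let best := if close + 1 > st.1 then close + 1 else st.1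
        (best, st.2.insert v (st.2.getD v 0 + 1))) (0, counts0)
  res.1

-- ===== PRECONDITION & SPEC =====
-- Pre_ excludes lists of length < 2, on which A raises (ValueError: max of an empty list).
def Pre_maxBalancedTeam (skills : List Int) : Prop := 2 ≤ skills.length
instance (skills : List Int) : Decidable (Pre_maxBalancedTeam skills) := by
  unfold Pre_maxBalancedTeam; infer_instance
def pvWitness_maxBalancedTeam : List Int := [3, 9]

def Spec_maxBalancedTeam (skills : List Int) (out : Int) : Prop := out = maxBalancedTeam_alt skills
instance (skills : List Int) (out : Int) : Decidable (Spec_maxBalancedTeam skills out) := by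
  unfold Spec_maxBalancedTeam; infer_instance

-- ===== CLAIM (what is proved, stated in full; the proofs are below) =====
def Claim_equal_maxBalancedTeam : Prop := ∀ (skills : List Int), Dom_maxBalancedTeam skills → Pre_maxBalancedTeam skills → Spec_maxBalancedTeam skills (maxBalancedTeam skills)

-- ===== LEMMAS AND PROOFS =====

-- the team size at index k: 1 + number of later elements within 5
def pvTeam (skills : List Int) (k : Nat) : Int :=
  1 + ((skills.drop (k + 1)).countP (fun y => decide ((skills.getD k 0 - y).natAbs ≤ 5)) : Int)

-- the common reference value: running max of pvTeam over indices 0 … m-1, started at `best`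
def pvRef (skills : List Int) : Nat → Int → Int
  | 0, best => best
  | k + 1, best => pvRef skills k (max best (pvTeam skills k))

lemma pvTeam_pos (skills : List Int) (k : Nat) : 1 ≤ pvTeam skills k := by
  unfold pvTeam; omega

lemma indicator_window (v y : Int) :
    ((([-5, -4, -3, -2, -1, 0, 1, 2, 3, 4, 5] : List Int)).map
      (fun dd => if y = v + dd then (1 : Int) else 0)).sum
    = if (v - y).natAbs ≤ 5 then (1 : Int) else 0 := by
  obtain ⟨e, rfl⟩ : ∃ e, y = v + e := ⟨y - v, by ring⟩
  simp only [List.map_cons, List.map_nil, List.sum_cons, List.sum_nil, add_zero,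
    show v - (v + e) = -e by ring, Int.natAbs_neg, add_right_inj]
  by_cases h : e.natAbs ≤ 5
  · have h1 : -5 ≤ e := by omega
    have h2 : e ≤ 5 := by omega
    interval_cases e <;> norm_num
  · rw [if_neg h, if_neg (by omega : ¬ e = -5), if_neg (by omega : ¬ e = -4),
      if_neg (by omega : ¬ e = -3), if_neg (by omega : ¬ e = -2),
      if_neg (by omega : ¬ e = -1), if_neg (by omega : ¬ e = 0),
      if_neg (by omega : ¬ e = 1), if_neg (by omega : ¬ e = 2),
      if_neg (by omega : ¬ e = 3), if_neg (by omega : ¬ e = 4),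
      if_neg (by omega : ¬ e = 5)]
    norm_num

lemma window_count (v : Int) (l : List Int) :
    ((([-5, -4, -3, -2, -1, 0, 1, 2, 3, 4, 5] : List Int)).map
      (fun dd => (l.count (v + dd) : Int))).sum
    = ((l.countP (fun y => decide ((v - y).natAbs ≤ 5)) : Nat) : Int) := by
  induction l with
  | nil => simp
  | cons y l ih =>
    simp only [List.count_cons, List.countP_cons, beq_iff_eq]
    push_cast
    rw [PySem.List.sum_map_add_int, ih, indicator_window]
    by_cases hc : (v - y).natAbs ≤ 5 <;> simp [hc]

lemma foldl_max_swap (t : Nat → Int) (l : List Nat) :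
    ∀ (b x : Int), l.foldl (fun b i => max b (t i)) (max b x)
      = max (l.foldl (fun b i => max b (t i)) b) x := by
  induction l with
  | nil => intro b x; rfl
  | cons a l ih =>
    intro b x
    simp only [List.foldl_cons, max_right_comm b x (t a)]
    exact ih (max b (t a)) x

lemma pvRef_eq_foldl (skills : List Int) :
    ∀ (k : Nat) (best : Int),
      pvRef skills k best = (List.range k).foldl (fun b i => max b (pvTeam skills i)) best := by
  intro k
  induction k with
  | zero => intro best; rfl
  | succ k ih =>
    intro best
    rw [pvRef, ih, List.range_succ, List.foldl_append]
    simp only [List.foldl_cons, List.foldl_nil]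
    rw [foldl_max_swap (pvTeam skills) (List.range k) best (pvTeam skills k)]

-- B's loop body, named for the proofs (definitionally the fold body of maxBalancedTeam_alt)
def pvStep (skills : List Int) (st : Int × PySem.Dict Int Int) (i : Int) :
    Int × PySem.Dict Int Int :=
  let v := PySem.List.pyGetD skills i 0
  let close : Int :=
    (PySem.List.pyRange (-5) 6 1).foldl (fun c dd => c + st.2.getD (v + dd) 0) 0
  (if close + 1 > st.1 then close + 1 else st.1, st.2.insert v (st.2.getD v 0 + 1))

-- B's loop invariant: with the dict counting the suffix skills[k:], the loop over
-- indices k-1 … 0 computes pvRef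
lemma alt_loop (skills : List Int) :
    ∀ (k : Nat) (best : Int) (d : PySem.Dict Int Int),
      k ≤ skills.length →
      (∀ w, d.getD w 0 = ((skills.drop k).count w : Int)) →
      ((PySem.List.pyRange ((k : Int) - 1) (-1) (-1)).foldl (pvStep skills) (best, d)).1
      = pvRef skills k best := by
  intro k
  induction k with
  | zero =>
    intro best d _ _
    rw [show ((0 : Nat) : Int) - 1 = -1 by norm_num,
      PySem.List.pyRange_neg_one_eq_nil (by norm_num)]
    rfl
  | succ k ih =>
    intro best d hk hd
    have hkl : k < skills.length := hk
    rw [show (((k + 1 : Nat)) : Int) - 1 = (k : Int) by push_cast; ring,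
      PySem.List.pyRange_neg_one_cons (by omega : (-1 : Int) < (k : Int)), List.foldl_cons]
    have hwin : PySem.List.pyRange (-5) 6 1 = [-5, -4, -3, -2, -1, 0, 1, 2, 3, 4, 5] := by decide
    have hclose : (PySem.List.pyRange (-5) 6 1).foldl
        (fun c dd => c + d.getD (skills.getD k 0 + dd) 0) 0
        = ((skills.drop (k + 1)).countP
            (fun y => decide ((skills.getD k 0 - y).natAbs ≤ 5)) : Int) := by
      rw [hwin, PySem.List.foldl_add]
      simp only [hd]
      rw [window_count]
      ring
    have hstep : pvStep skills (best, d) ((k : Nat) : Int)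
        = (max best (pvTeam skills k),
           d.insert (skills.getD k 0) (d.getD (skills.getD k 0) 0 + 1)) := by
      unfold pvStep
      simp only [PySem.List.pyGetD_natCast]
      rw [hclose]
      unfold pvTeam
      rw [Prod.mk.injEq]
      exact ⟨by omega, rfl⟩
    rw [hstep]
    have hdrop : skills.drop k = skills.getD k 0 :: skills.drop (k + 1) := by
      rw [List.getD_eq_getElem skills 0 hkl]
      exact List.drop_eq_getElem_cons hkl
    have hd' : ∀ w, (d.insert (skills.getD k 0) (d.getD (skills.getD k 0) 0 + 1)).getD w 0
        = ((skills.drop k).count w : Int) := by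
      intro w
      rw [PySem.Dict.getD_insert, hdrop, List.count_cons]
      by_cases hw : w = skills.getD k 0
      · rw [if_pos hw, hd, hw]
        simp
      · rw [if_neg hw, hd, if_neg (by simpa using Ne.symm hw)]
        simp
    rw [pvRef]
    exact ih (max best (pvTeam skills k)) _ (by omega) hd'

lemma A_eq_ref (skills : List Int) (h : 2 ≤ skills.length) :
    maxBalancedTeam skills = pvRef skills (skills.length - 1) 0 := by
  unfold maxBalancedTeam
  simp only [PySem.List.foldl_append_singleton_eq_map, List.nil_append, PySem.List.len_eq]
  have hmap : (PySem.List.pyRange 0 ((skills.length : Int) - 1) 1).map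
      (fun i => (PySem.List.pyRange (i + 1) ((skills.length : Int)) 1).foldl
        (fun maxTeam j =>
          if (PySem.List.pyGetD skills i 0 - PySem.List.pyGetD skills j 0).natAbs ≤ 5 then
            maxTeam + 1
          else maxTeam) 1)
      = (List.range (skills.length - 1)).map (fun k => pvTeam skills k) := by
    rw [PySem.List.pyRange_one 0 ((skills.length : Int) - 1), List.map_map]
    rw [show ((skills.length : Int) - 1 - 0).toNat = skills.length - 1 by omega]
    apply List.map_congr_left
    intro k hk
    simp only [Function.comp_apply, zero_add]
    rw [show ((k : Int) + 1) = (((k + 1 : Nat)) : Int) by push_cast; ring]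
    rw [PySem.List.foldl_pyRange_pyGetD' skills 0
      (f := fun maxTeam y =>
        if (PySem.List.pyGetD skills ((k : Nat) : Int) 0 - y).natAbs ≤ 5 then maxTeam + 1
        else maxTeam) 1 (by omega)]
    rw [show (((k + 1 : Nat) : Int)).toNat = k + 1 by omega]
    simp only [PySem.List.pyGetD_natCast]
    rw [PySem.List.foldl_ite_add_one (fun y => (skills.getD k 0 - y).natAbs ≤ 5)]
    unfold pvTeam
    ring
  rw [hmap]
  obtain ⟨m, hm⟩ : ∃ m, skills.length - 1 = m + 1 := ⟨skills.length - 2, by omega⟩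
  rw [hm, List.range_succ_eq_map, List.map_cons, PySem.List.max?_id_cons, Option.getD_some,
    List.map_map]
  rw [pvRef_eq_foldl, List.range_succ_eq_map, List.foldl_cons,
    show max 0 (pvTeam skills 0) = pvTeam skills 0 by have := pvTeam_pos skills 0; omega]
  simp only [List.foldl_map, Function.comp_apply]

lemma B_eq_ref (skills : List Int) (h : 2 ≤ skills.length) :
    maxBalancedTeam_alt skills = pvRef skills (skills.length - 1) 0 := by
  have hne : skills ≠ [] := by
    intro hnil
    rw [hnil] at h
    simp at h
  unfold maxBalancedTeam_alt
  simp only [PySem.List.len_eq]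
  rw [show (fun (st : Int × PySem.Dict Int Int) i =>
        let v := PySem.List.pyGetD skills i 0
        let close : Int :=
          (PySem.List.pyRange (-5) 6 1).foldl (fun c dd => c + st.2.getD (v + dd) 0) 0
        let best := if close + 1 > st.1 then close + 1 else st.1
        (best, st.2.insert v (st.2.getD v 0 + 1))) = pvStep skills from by
    funext st i
    rfl]
  rw [show (skills.length : Int) - 2 = (((skills.length - 1 : Nat)) : Int) - 1 by
    push_cast [Nat.cast_sub (by omega : 1 ≤ skills.length)]; ring]
  apply alt_loop skills (skills.length - 1) 0 _ (by omega)
  intro w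
  rw [List.drop_length_sub_one hne, PySem.List.pyGetD_neg_one skills 0 hne,
    PySem.Dict.getD_insert]
  by_cases hw : w = skills.getLast hne
  · rw [if_pos hw, hw]
    simp
  · rw [if_neg hw, PySem.Dict.getD_empty]
    simp [Ne.symm hw]

-- ===== VERDICT (by name: the statement is the Claim_ definition above) =====
theorem maxBalancedTeam_spec : Claim_equal_maxBalancedTeam := by
  intro skills _ hpre
  unfold Spec_maxBalancedTeam
  rw [A_eq_ref skills hpre, B_eq_ref skills hpre]
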